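-- pv_equiv track=rewrite | github.com/nastia-vorobiova/KPI | OP_2/lab 1/Python/edittext.py | linewithoutspaces
-- ===== SOURCE A (Python) =====
-- def linewithoutspaces(lines):
--     spaces = 0
--     for i in range(len(lines)):
--         editedline = ""
--         k = 1
--         while k < len(lines[i]):
--             if lines[i][k] == ' ' and lines[i][k] == lines[i][k-1]:
--                 lines[i] = lines[i][:k] + lines[i][k+1:]
--                 k -= 1
--                 spaces += 1
--             k += 1
--     return lines, spaces
-- ===== SOURCE B (Python) =====
-- def linewithoutspaces(lines):
--     # Run-level scan: find each maximal run of equal characters with a second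
--     # pointer, emit a single ' ' for a space run, the run unchanged otherwise.
--     spaces = 0
--     for i, line in enumerate(lines):
--         out = []
--         j = 0
--         n = len(line)
--         while j < n:
--             c = line[j]
--             r = j + 1
--             while r < n and line[r] == c:
--                 r += 1
--             out.append(c if c == ' ' else line[j:r])
--             j = r
--         new = ''.join(out)
--         spaces += n - len(new)
--         lines[i] = new
--     return lines, spaces
-- ===== Notes on version B (the rewrite author's own statement) =====
-- stated objective: alternative
-- what changed: A repeatedly deletes one space at a time by rebuilding the whole string with slicing and re-checking the same position; B instead does a two-pointer run-length scan per line, emitting one space per space run and other runs unchanged, and counts removals as the length difference.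
import Mathlib
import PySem

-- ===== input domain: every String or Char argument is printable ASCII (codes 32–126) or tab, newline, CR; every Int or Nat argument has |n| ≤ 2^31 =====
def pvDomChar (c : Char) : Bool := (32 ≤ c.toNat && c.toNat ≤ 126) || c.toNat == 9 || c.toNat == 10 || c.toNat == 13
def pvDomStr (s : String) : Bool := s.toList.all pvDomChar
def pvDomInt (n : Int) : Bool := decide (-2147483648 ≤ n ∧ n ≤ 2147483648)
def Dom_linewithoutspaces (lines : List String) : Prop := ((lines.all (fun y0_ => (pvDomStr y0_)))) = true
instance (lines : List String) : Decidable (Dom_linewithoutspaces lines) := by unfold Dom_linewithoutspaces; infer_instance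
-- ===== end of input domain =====

-- B collapses space runs with a two-pointer run scan per line instead of
-- A's repeated one-character deletions via full-string slicing. Both mutate the
-- Python list in place; the equivalence proved is about the returned value.

-- ===== PORT A =====
-- inner while loop of A: k scans the line, deleting lines[i][k] when it and its
-- predecessor are both spaces (then k -= 1; spaces += 1), finally k += 1.
-- fuel = s.length - k bounds the iterations exactly (each step shrinks it by 1).
def pvLoopAF : Nat → List Char → Nat → List Char × Int
  | 0, s, _ => (s, 0)
  | fuel + 1, s, k =>
    if k < s.length then
      if PySem.List.pyGetD s (k : Int) ' ' = ' ' ∧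
         PySem.List.pyGetD s (k : Int) ' ' = PySem.List.pyGetD s ((k : Int) - 1) ' ' then
        -- lines[i] = lines[i][:k] + lines[i][k+1:]; k -= 1; spaces += 1; k += 1
        let s' := PySem.List.slice s none (some (k : Int)) ++
                  PySem.List.slice s (some ((k + 1 : Nat) : Int)) none
        let res := pvLoopAF fuel s' k
        (res.1, res.2 + 1)
      else
        pvLoopAF fuel s (k + 1)
    else (s, 0)

def pvLoopA (s : List Char) (k : Nat) : List Char × Int := pvLoopAF (s.length - k) s k

def linewithoutspaces (lines : List String) : List String × Int :=
  lines.foldl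
    (fun acc line =>
      let r := pvLoopA line.toList 1
      (acc.1 ++ [String.ofList r.1], acc.2 + r.2))
    ([], 0)

-- ===== PORT B =====
-- inner while: advance r past the run of characters equal to c (fuel = length - r)
def pvRunEndF : Nat → List Char → Char → Nat → Nat
  | 0, _, _, r => r
  | fuel + 1, line, c, r =>
    if r < line.length ∧ PySem.List.pyGetD line (r : Int) ' ' = c then
      pvRunEndF fuel line c (r + 1)
    else r

def pvRunEnd (line : List Char) (c : Char) (r : Nat) : Nat :=
  pvRunEndF (line.length - r) line c r

-- outer while over j: emit ' ' for a space run, line[j:r] otherwise (fuel = length - j)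
def pvScanBF : Nat → List Char → Nat → List Char
  | 0, _, _ => []
  | fuel + 1, line, j =>
    if j < line.length then
      let c := PySem.List.pyGetD line (j : Int) ' '
      let r := pvRunEnd line c (j + 1)
      (if c = ' ' then [c] else PySem.List.slice line (some (j : Int)) (some (r : Int))) ++
        pvScanBF fuel line r
    else []

def pvScanB (line : List Char) (j : Nat) : List Char := pvScanBF (line.length - j) line j

def linewithoutspaces_alt (lines : List String) : List String × Int :=
  lines.foldl
    (fun acc line =>
      let new := String.ofList (pvScanB line.toList 0)
      (acc.1 ++ [new], acc.2 + ((line.toList.length : Int) - ((pvScanB line.toList 0).length : Int))))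
    ([], 0)

-- ===== PRECONDITION & SPEC =====
def Spec_linewithoutspaces (lines : List String) (out : List String × Int) : Prop := out = linewithoutspaces_alt lines
instance (lines : List String) (out : List String × Int) : Decidable (Spec_linewithoutspaces lines out) := by unfold Spec_linewithoutspaces; infer_instance

-- ===== CLAIM (what is proved, stated in full; the proofs are below) =====
def Claim_equal_linewithoutspaces : Prop := ∀ (lines : List String), Dom_linewithoutspaces lines → Spec_linewithoutspaces lines (linewithoutspaces lines)

-- ===== LEMMAS AND PROOFS =====

-- reference collapse: one space per space run, everything else unchanged
def pvNorm (prev : Char) : List Char → List Char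
  | [] => []
  | c :: t => if c = ' ' ∧ prev = ' ' then pvNorm prev t else c :: pvNorm c t

def pvNormStart : List Char → List Char
  | [] => []
  | c :: t => c :: pvNorm c t

theorem pvDropWhile_head_ne (c d : Char) : ∀ (t : List Char),
    (t.dropWhile (· = c)).head? = some d → ¬ d = c := by
  intro t
  induction t with
  | nil => simp
  | cons a t ih =>
    intro h
    rw [List.dropWhile_cons] at h
    by_cases ha : a = c
    · simp [ha] at h; exact ih h
    · simp [ha] at h; subst h; exact ha

theorem pvDrop_takeWhile_len (t : List Char) (c : Char) :
    t.drop ((t.takeWhile (· = c)).length) = t.dropWhile (· = c) := by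
  induction t with
  | nil => simp
  | cons a t ih => by_cases h : a = c <;> simp [h, ih]

theorem pvTake_takeWhile_len (t : List Char) (c : Char) :
    t.take ((t.takeWhile (· = c)).length) = t.takeWhile (· = c) := by
  induction t with
  | nil => simp
  | cons a t ih => by_cases h : a = c <;> simp [h, ih]

theorem pvNorm_run (c : Char) : ∀ (l rest : List Char), (∀ x ∈ l, x = c) →
    pvNorm c (l ++ rest) = (if c = ' ' then [] else l) ++ pvNorm c rest := by
  intro l
  induction l with
  | nil => intro rest _; simp
  | cons a l ih =>
    intro rest h
    have ha : a = c := h a (by simp)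
    have hl : ∀ x ∈ l, x = c := fun x hx => h x (by simp [hx])
    have := ih rest hl
    by_cases hc : c = ' '
    · simpa [pvNorm, ha, hc] using this
    · simp [pvNorm, ha, hc, this]

theorem pvNorm_eq_normStart (prev : Char) (l : List Char)
    (h : ∀ d, l.head? = some d → ¬(d = ' ' ∧ prev = ' ')) :
    pvNorm prev l = pvNormStart l := by
  cases l with
  | nil => rfl
  | cons c t => simp [pvNorm, pvNormStart, h c rfl]

theorem pvGetD_getElem (s : List Char) (k : Nat) (h : k < s.length) :
    s.getD k ' ' = s[k] := by
  simp [List.getD, List.getElem?_eq_getElem h]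

theorem pvRunEndF_eq (ln : List Char) (c : Char) : ∀ (fuel r : Nat), ln.length - r ≤ fuel →
    pvRunEndF fuel ln c r = r + (((ln.drop r).takeWhile (· = c)).length) := by
  intro fuel
  induction fuel with
  | zero =>
    intro r h
    rw [List.drop_eq_nil_of_le (by omega)]
    simp [pvRunEndF]
  | succ fuel ih =>
    intro r h
    by_cases hcond : r < ln.length ∧ PySem.List.pyGetD ln (r : Int) ' ' = c
    · rw [show pvRunEndF (fuel + 1) ln c r
          = if r < ln.length ∧ PySem.List.pyGetD ln (r : Int) ' ' = c then
              pvRunEndF fuel ln c (r + 1) else r from rfl, if_pos hcond]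
      obtain ⟨hr, hc⟩ := hcond
      rw [PySem.List.pyGetD_natCast] at hc
      have hc' : ln[r] = c := by rw [← pvGetD_getElem ln r hr]; exact hc
      rw [ih (r + 1) (by omega), List.drop_eq_getElem_cons hr, List.takeWhile_cons]
      simp [hc']
      omega
    · rw [show pvRunEndF (fuel + 1) ln c r
          = if r < ln.length ∧ PySem.List.pyGetD ln (r : Int) ' ' = c then
              pvRunEndF fuel ln c (r + 1) else r from rfl, if_neg hcond]
      by_cases hr : r < ln.length
      · have hc : ¬ PySem.List.pyGetD ln (r : Int) ' ' = c := by tauto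
        rw [PySem.List.pyGetD_natCast] at hc
        have hc' : ¬ ln[r] = c := by rw [← pvGetD_getElem ln r hr]; exact hc
        rw [List.drop_eq_getElem_cons hr, List.takeWhile_cons]
        simp [hc']
      · simp [List.drop_eq_nil_of_le (by omega : ln.length ≤ r)]

theorem pvRunEnd_eq (ln : List Char) (c : Char) (r : Nat) :
    pvRunEnd ln c r = r + (((ln.drop r).takeWhile (· = c)).length) :=
  pvRunEndF_eq ln c (ln.length - r) r le_rfl

theorem pvLoopAF_eq : ∀ (fuel : Nat) (s : List Char) (k : Nat), s.length - k ≤ fuel → 1 ≤ k →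
    pvLoopAF fuel s k = (s.take k ++ pvNorm (s.getD (k - 1) ' ') (s.drop k),
      ((s.drop k).length : Int) - ((pvNorm (s.getD (k - 1) ' ') (s.drop k)).length : Int)) := by
  intro fuel
  induction fuel with
  | zero =>
    intro s k h _
    have h1 : s.length ≤ k := by omega
    simp [pvLoopAF, List.take_of_length_le h1, List.drop_eq_nil_of_le h1, pvNorm]
  | succ fuel ih =>
    intro s k hfuel h1
    by_cases hk : k < s.length
    · by_cases hcond : PySem.List.pyGetD s (k : Int) ' ' = ' ' ∧
          PySem.List.pyGetD s (k : Int) ' ' = PySem.List.pyGetD s ((k : Int) - 1) ' '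
      · rw [show pvLoopAF (fuel + 1) s k
            = ((pvLoopAF fuel (PySem.List.slice s none (some (k : Int)) ++
                PySem.List.slice s (some ((k + 1 : Nat) : Int)) none) k).1,
               (pvLoopAF fuel (PySem.List.slice s none (some (k : Int)) ++
                PySem.List.slice s (some ((k + 1 : Nat) : Int)) none) k).2 + 1) from by
              simp only [pvLoopAF]; rw [if_pos hk, if_pos hcond]]
        set s' := PySem.List.slice s none (some (k : Int)) ++
          PySem.List.slice s (some ((k + 1 : Nat) : Int)) none with hs'def
        have hk1 : ((k : Int) - 1) = ((k - 1 : Nat) : Int) := by omega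
        rw [PySem.List.pyGetD_natCast, hk1, PySem.List.pyGetD_natCast] at hcond
        have hsk := pvGetD_getElem s k hk
        have hks : s[k] = ' ' := by rw [← hsk]; exact hcond.1
        have hprev : s.getD (k - 1) ' ' = ' ' := by rw [← hcond.2, hcond.1]
        have hs' : s' = s.take k ++ s.drop (k + 1) := by
          rw [hs'def, PySem.List.slice_to_natCast, PySem.List.slice_from_natCast]
        have hlen : (s.take k).length = k := by rw [List.length_take]; omega
        have htk : s'.take k = s.take k := by rw [hs']; exact List.take_left' hlen
        have hdk : s'.drop k = s.drop (k + 1) := by rw [hs']; exact List.drop_left' hlen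
        have hgd : s'.getD (k - 1) ' ' = s.getD (k - 1) ' ' := by
          rw [hs', List.getD_append _ _ _ _ (by omega)]
          have h0 : 0 < k := h1
          simp [List.getD, h0]
        have hdrop : s.drop k = s[k] :: s.drop (k + 1) := List.drop_eq_getElem_cons hk
        have hnorm : pvNorm (s.getD (k - 1) ' ') (s.drop k)
            = pvNorm (s.getD (k - 1) ' ') (s.drop (k + 1)) := by
          rw [hdrop, pvNorm, if_pos ⟨hks, hprev⟩]
        have hs'l : s'.length = s.length - 1 := by
          rw [hs']; simp [List.length_take, List.length_drop]; omega
        rw [ih s' k (by omega) h1, htk, hdk, hgd, hnorm]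
        have hdl : (s.drop k).length = (s.drop (k + 1)).length + 1 := by
          simp [List.length_drop]; omega
        refine Prod.ext rfl ?_
        simp only [hdl]
        push_cast
        ring
      · rw [show pvLoopAF (fuel + 1) s k = pvLoopAF fuel s (k + 1) from by
              simp only [pvLoopAF]; rw [if_pos hk, if_neg hcond]]
        have hk1 : ((k : Int) - 1) = ((k - 1 : Nat) : Int) := by omega
        rw [PySem.List.pyGetD_natCast, hk1, PySem.List.pyGetD_natCast] at hcond
        have hsk := pvGetD_getElem s k hk
        have hnc : ¬ (s[k] = ' ' ∧ s.getD (k - 1) ' ' = ' ') := by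
          intro ⟨ha, hb⟩
          exact hcond ⟨by rw [hsk]; exact ha, by rw [hsk, ha, hb]⟩
        have hdrop : s.drop k = s[k] :: s.drop (k + 1) := List.drop_eq_getElem_cons hk
        have hnorm : pvNorm (s.getD (k - 1) ' ') (s.drop k)
            = s[k] :: pvNorm s[k] (s.drop (k + 1)) := by
          rw [hdrop, pvNorm, if_neg hnc]
        rw [ih s (k + 1) (by omega) (by omega)]
        have hg2 : s.getD (k + 1 - 1) ' ' = s[k] := by simpa using hsk
        rw [hg2, hnorm]
        have hdl : (s.drop k).length = (s.drop (k + 1)).length + 1 := by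
          simp [List.length_drop]; omega
        refine Prod.ext (by rw [List.take_succ_eq_append_getElem hk, List.append_assoc]; rfl) ?_
        simp only [hdl, List.length_cons]
        push_cast
        ring
    · have h2 : s.length ≤ k := by omega
      rw [show pvLoopAF (fuel + 1) s k = (s, 0) from by simp only [pvLoopAF]; rw [if_neg hk]]
      simp [List.take_of_length_le h2, List.drop_eq_nil_of_le h2, pvNorm]

theorem pvLoopA_eq (s : List Char) (k : Nat) (h1 : 1 ≤ k) :
    pvLoopA s k = (s.take k ++ pvNorm (s.getD (k - 1) ' ') (s.drop k),
      ((s.drop k).length : Int) - ((pvNorm (s.getD (k - 1) ' ') (s.drop k)).length : Int)) :=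
  pvLoopAF_eq (s.length - k) s k le_rfl h1

theorem pvScanBF_eq (ln : List Char) : ∀ (fuel j : Nat), ln.length - j ≤ fuel →
    pvScanBF fuel ln j = pvNormStart (ln.drop j) := by
  intro fuel
  induction fuel with
  | zero =>
    intro j h
    rw [List.drop_eq_nil_of_le (by omega)]
    simp [pvScanBF, pvNormStart]
  | succ fuel ih =>
    intro j hfuel
    by_cases hj : j < ln.length
    · rw [show pvScanBF (fuel + 1) ln j
          = (if PySem.List.pyGetD ln (j : Int) ' ' = ' '
              then [PySem.List.pyGetD ln (j : Int) ' ']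
              else PySem.List.slice ln (some (j : Int))
                (some ((pvRunEnd ln (PySem.List.pyGetD ln (j : Int) ' ') (j + 1) : Nat) : Int))) ++
            pvScanBF fuel ln (pvRunEnd ln (PySem.List.pyGetD ln (j : Int) ' ') (j + 1)) from by
            simp only [pvScanBF]; rw [if_pos hj]]
      set c := PySem.List.pyGetD ln (j : Int) ' ' with hcdef
      set r := pvRunEnd ln c (j + 1) with hrdef
      have hcg : c = ln[j] := by
        rw [hcdef, PySem.List.pyGetD_natCast]; exact pvGetD_getElem ln j hj
      have hr : r = j + 1 + (((ln.drop (j + 1)).takeWhile (· = c)).length) := by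
        rw [hrdef]; exact pvRunEnd_eq ln c (j + 1)
      set t := ln.drop (j + 1) with ht
      have hdj : ln.drop j = c :: t := by rw [hcg, ht]; exact List.drop_eq_getElem_cons hj
      have hdr : ln.drop r = t.dropWhile (· = c) := by
        rw [hr, ← List.drop_drop, ← ht, pvDrop_takeWhile_len]
      have hslice : PySem.List.slice ln (some (j : Int)) (some (r : Int))
          = c :: t.takeWhile (· = c) := by
        rw [PySem.List.slice_natCast, hdj, hr]
        have : j + 1 + (t.takeWhile (· = c)).length - j = (t.takeWhile (· = c)).length + 1 := by
          omega
        rw [this, List.take_succ_cons, pvTake_takeWhile_len]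
      have hhead : ∀ d, (t.dropWhile (· = c)).head? = some d → ¬ (d = ' ' ∧ c = ' ') := by
        intro d hd ⟨hd1, hd2⟩
        exact pvDropWhile_head_ne c d t hd (by rw [hd1, hd2])
      have hfr : ln.length - r ≤ fuel := by omega
      rw [ih r hfr, hdr, hdj, hslice]
      show _ = pvNormStart (c :: t)
      rw [pvNormStart]
      conv_rhs => rw [← List.takeWhile_append_dropWhile (p := (· = c)) (l := t)]
      rw [pvNorm_run c _ _ (fun x hx => by simpa using List.mem_takeWhile_imp hx),
          pvNorm_eq_normStart c (t.dropWhile (· = c)) hhead]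
      by_cases hc : c = ' ' <;> simp [hc]
    · rw [List.drop_eq_nil_of_le (by omega)]
      rw [show pvScanBF (fuel + 1) ln j = [] from by simp only [pvScanBF]; rw [if_neg hj]]
      rfl

theorem pvScanB_eq (ln : List Char) (j : Nat) :
    pvScanB ln j = pvNormStart (ln.drop j) :=
  pvScanBF_eq ln (ln.length - j) j le_rfl

theorem pvLine_eq (ln : List Char) :
    pvLoopA ln 1 = (pvScanB ln 0,
      ((ln.length : Int) - (((pvScanB ln 0).length : Int)))) := by
  rw [pvLoopA_eq ln 1 le_rfl, pvScanB_eq ln 0, List.drop_zero]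
  cases ln with
  | nil => simp [pvNormStart, pvNorm]
  | cons c t =>
    have hg : (c :: t).getD 0 ' ' = c := rfl
    have h1 : (c :: t).take 1 = [c] := rfl
    have hd : (c :: t).drop 1 = t := rfl
    rw [show (1 - 1 : Nat) = 0 from rfl, hg, h1, hd, pvNormStart]
    refine Prod.ext rfl ?_
    simp only [List.length_cons]
    push_cast
    ring

-- ===== VERDICT (by name: the statement is the Claim_ definition above) =====
theorem linewithoutspaces_spec : Claim_equal_linewithoutspaces := by
  intro lines _
  unfold Spec_linewithoutspaces linewithoutspaces linewithoutspaces_alt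
  congr 1
  funext acc ln
  rw [pvLine_eq ln.toList]
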